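-- pv_equiv track=rewrite | github.com/magie-network/MAGIE | src/magie/utils.py | normalise_site_name
-- ===== SOURCE A (Python) =====
-- SITE_ALIASES = {
--     "dun": "dunsink",
--     "dunsink": "dunsink",
--     "dun_eziemag": "dunsink EZIE Mag",
--     "dunsink_eziemag": "dunsink EZIE Mag",
--     "val": "valentia",
--     "valentia": "valentia",
--     "arm": "armagh",
--     "armagh": "armagh",
-- }
--
-- def normalise_site_name(site):
--     """Map a site label such as ``dun_test`` or ``Valentia`` to a known site key."""
--     if site is None:
--         return None
--
--     label = str(site).strip().lower()
--     if not label: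
--         return None
--
--     for separator in ("_", "-", " "):
--         label = label.split(separator, 1)[0]
--
--     return SITE_ALIASES.get(label)
-- ===== SOURCE B (Python) =====
-- SITE_ALIASES = {
--     "dun": "dunsink",
--     "dunsink": "dunsink",
--     "dun_eziemag": "dunsink EZIE Mag",
--     "dunsink_eziemag": "dunsink EZIE Mag",
--     "val": "valentia",
--     "valentia": "valentia",
--     "arm": "armagh",
--     "armagh": "armagh",
-- }
--
-- def normalise_site_name(site):
--     """Map a site label such as ``dun_test`` or ``Valentia`` to a known site key."""
--     if site is None:
--         return None
--
--     label = str(site).strip().lower()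
--     if not label:
--         return None
--
--     head = []
--     for ch in label:
--         if ch in "_- ":
--             break
--         head.append(ch)
--
--     return SITE_ALIASES.get("".join(head))
-- ===== Notes on version B (the rewrite author's own statement) =====
-- stated objective: simpler
-- what changed: Replaces the three sequential split(sep,1)[0] passes with a single left-to-right scan that stops at the first separator character ('_', '-' or ' ').
import Mathlib
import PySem

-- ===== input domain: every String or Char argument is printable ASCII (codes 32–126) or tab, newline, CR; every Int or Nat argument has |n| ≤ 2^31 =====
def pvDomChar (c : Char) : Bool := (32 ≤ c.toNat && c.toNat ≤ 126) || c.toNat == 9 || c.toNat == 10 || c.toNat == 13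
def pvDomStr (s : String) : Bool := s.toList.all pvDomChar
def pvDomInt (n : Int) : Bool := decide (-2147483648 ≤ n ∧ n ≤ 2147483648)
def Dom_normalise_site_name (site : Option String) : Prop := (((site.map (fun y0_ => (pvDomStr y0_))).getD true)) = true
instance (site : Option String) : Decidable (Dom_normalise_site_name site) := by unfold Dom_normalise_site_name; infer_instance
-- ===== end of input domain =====

-- B replaces A's three sequential split(sep,1)[0] passes by one scan that stops at the
-- first separator character; objective: simpler (single pass, same result).

-- ===== PORT A =====
def pvSITE_ALIASES : PySem.Dict String String := PySem.Dict.mk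
  [("dun", "dunsink"),
   ("dunsink", "dunsink"),
   ("dun_eziemag", "dunsink EZIE Mag"),
   ("dunsink_eziemag", "dunsink EZIE Mag"),
   ("val", "valentia"),
   ("valentia", "valentia"),
   ("arm", "armagh"),
   ("armagh", "armagh")]

def normalise_site_name (site : Option String) : Option String :=
  match site with
  | none => none
  | some s =>
    let label := PySem.Str.lower (PySem.Str.strip s)
    if label = "" then none
    else
      -- for separator in ("_", "-", " "): label = label.split(separator, 1)[0]
      -- (split with a nonempty separator always yields a nonempty list, so [0] = headD "")
      let label := ["_", "-", " "].foldl
        (fun lab sep => ((PySem.Str.splitMax? lab sep 1).getD []).headD "") label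
      PySem.Dict.get? pvSITE_ALIASES label

-- ===== PORT B =====
def normalise_site_name_alt (site : Option String) : Option String :=
  match site with
  | none => none
  | some s =>
    let label := PySem.Str.lower (PySem.Str.strip s)
    if label = "" then none
    else
      -- single scan: keep characters until the first '_', '-' or ' '
      let head := label.toList.takeWhile (fun ch => !(ch == '_' || ch == '-' || ch == ' '))
      PySem.Dict.get? pvSITE_ALIASES (String.ofList head)

-- ===== PRECONDITION & SPEC =====
def Spec_normalise_site_name (site : Option String) (out : Option String) : Prop := out = normalise_site_name_alt site
instance (site : Option String) (out : Option String) : Decidable (Spec_normalise_site_name site out) := by unfold Spec_normalise_site_name; infer_instance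

-- ===== CLAIM (what is proved, stated in full; the proofs are below) =====
def Claim_equal_normalise_site_name : Prop := ∀ (site : Option String), Dom_normalise_site_name site → Spec_normalise_site_name site (normalise_site_name site)

-- ===== LEMMAS AND PROOFS =====

-- splitOnMax.go with maxsplit exhausted returns the rest as one piece
lemma go_msplit_zero (c : Char) (fuel : Nat) (l cur : List Char) (acc : List (List Char)) :
    PySem.Chars.splitOnMax.go [c] fuel 0 l cur acc = ((cur.reverse ++ l) :: acc).reverse := by
  cases fuel with
  | zero => simp [PySem.Chars.splitOnMax.go]
  | succ n => cases l <;> simp [PySem.Chars.splitOnMax.go]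

-- splitOnMax.go with maxsplit 1 and a one-character separator: the first piece is the
-- prefix before the first occurrence of that character
lemma go_msplit_one (c : Char) : ∀ (fuel : Nat) (l cur : List Char), l.length < fuel →
    PySem.Chars.splitOnMax.go [c] fuel 1 l cur [] =
      (cur.reverse ++ l.takeWhile (fun a => a ≠ c)) ::
        (if c ∈ l then [(l.dropWhile (fun a => a ≠ c)).drop 1] else []) := by
  intro fuel
  induction fuel with
  | zero => intro l cur h; omega
  | succ n ih =>
    intro l cur h
    cases l with
    | nil => simp [PySem.Chars.splitOnMax.go]
    | cons hd tl =>
      by_cases hc : hd = c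
      · subst hc
        simp [PySem.Chars.splitOnMax.go, go_msplit_zero]
      · have hlt : tl.length < n := by simpa using h
        have hpre : [c].isPrefixOf (hd :: tl) = false := by
          simp [List.isPrefixOf]; exact fun hh => hc hh.symm
        simp [PySem.Chars.splitOnMax.go, hpre, ih tl (hd :: cur) hlt, hc,
          Ne.symm hc]

-- one A-step: label.split(sep, 1)[0] with a one-character sep = prefix before that char
lemma step_eq (s : String) (sep : String) (c : Char) (hsep : sep.toList = [c]) :
    ((PySem.Str.splitMax? s sep 1).getD []).headD "" =
      String.ofList (s.toList.takeWhile (fun a => a ≠ c)) := by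
  have hlen : s.toList.length < s.toList.length + 1 := Nat.lt_succ_self _
  simp only [PySem.Str.splitMax?, PySem.Chars.splitMax?, hsep, PySem.Chars.splitOnMax,
    Int.toNat_one, List.isEmpty_cons, Bool.false_eq_true, if_false,
    show ¬((1:ℤ) < 0) by norm_num]
  rw [go_msplit_one c (s.toList.length + 1) s.toList [] hlen]
  simp

-- the three successive prefixes equal one takeWhile with the combined predicate
lemma triple_take (L : List Char) :
    ((L.takeWhile (fun a => a ≠ '_')).takeWhile (fun a => a ≠ '-')).takeWhile (fun a => a ≠ ' ') =
      L.takeWhile (fun ch => !(ch == '_' || ch == '-' || ch == ' ')) := by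
  rw [List.takeWhile_takeWhile, List.takeWhile_takeWhile]
  congr 1
  funext a
  by_cases h1 : a = '_' <;> by_cases h2 : a = '-' <;> by_cases h3 : a = ' ' <;>
    simp [h1, h2, h3]

-- ===== VERDICT (by name: the statement is the Claim_ definition above) =====
theorem normalise_site_name_spec : Claim_equal_normalise_site_name := by
  intro site _
  unfold Spec_normalise_site_name normalise_site_name normalise_site_name_alt
  cases site with
  | none => rfl
  | some s =>
    dsimp only
    set L := (PySem.Str.lower (PySem.Str.strip s)) with hL
    by_cases hE : L = ""
    · simp [hE]
    · simp only [hE, if_false]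
      have hfold : ["_", "-", " "].foldl
          (fun lab sep => ((PySem.Str.splitMax? lab sep 1).getD []).headD "") L =
          String.ofList (L.toList.takeWhile (fun ch => !(ch == '_' || ch == '-' || ch == ' '))) := by
        rw [List.foldl_cons, List.foldl_cons, List.foldl_cons, List.foldl_nil]
        rw [step_eq L "_" '_' (by decide),
            step_eq _ "-" '-' (by decide),
            step_eq _ " " ' ' (by decide)]
        simp only [String.toList_ofList]
        rw [triple_take]
      rw [hfold]
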